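-- pv_equiv track=rewrite | github.com/Azure64933/CSR | cogs/deal_string.py | del_space
-- ===== SOURCE A (Python) =====
-- def del_space(str):
--     s = str
--     lst = s.split(' ')
--     new_s = ''
--     for x in lst:
--         # 只判斷該字串最後一個字元是否為英文，是英文的話就用空格接起
--         if x[-1:].encode('UTF-8').isalpha() or x[-1:].isdigit():
--             new_s += x
--             new_s += " "
--         else:
--             new_s += x
--
--     return new_s
-- ===== SOURCE B (Python) =====
-- def _keeps(prev):
--     # single ASCII letter or digit (matches A's x[-1:].encode('UTF-8').isalpha() or x[-1:].isdigit() on ASCII input)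
--     return 'a' <= prev <= 'z' or 'A' <= prev <= 'Z' or '0' <= prev <= '9'
--
-- def del_space(str):
--     s = str
--     buf = []
--     prev = ''
--     for c in s:
--         if c != ' ':
--             buf.append(c)
--         elif _keeps(prev):
--             buf.append(' ')
--         prev = c
--     if _keeps(prev):
--         buf.append(' ')
--     return ''.join(buf)
-- ===== Notes on version B (the rewrite author's own statement) =====
-- stated objective: alternative
-- what changed: Replaced the split-on-space token loop that re-inspects each token's last character with a single character-level pass that tracks the previous character and decides each kept space (and the trailing space) from it.
import Mathlib
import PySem

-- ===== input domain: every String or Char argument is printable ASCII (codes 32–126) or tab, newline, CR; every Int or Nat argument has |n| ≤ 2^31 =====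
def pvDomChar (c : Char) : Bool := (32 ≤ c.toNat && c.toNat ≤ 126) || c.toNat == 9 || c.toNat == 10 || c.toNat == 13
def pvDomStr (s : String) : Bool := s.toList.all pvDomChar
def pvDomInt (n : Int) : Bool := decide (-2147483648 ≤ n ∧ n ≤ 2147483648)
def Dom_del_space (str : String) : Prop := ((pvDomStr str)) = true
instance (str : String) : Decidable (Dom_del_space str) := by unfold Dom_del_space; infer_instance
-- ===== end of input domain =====

-- B replaces A's split(' ')+token-loop by a single character pass that tracks the previous
-- character, deciding each space and the trailing space from it (objective: alternative).


-- ===== PORT A =====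
-- x.encode('UTF-8').isalpha(): nonempty and every byte an ASCII letter; exact on the ASCII domain
-- (a non-ASCII char encodes to non-letter bytes, and this helper also returns false for it).
def pyBytesIsalpha (l : List Char) : Bool :=
  !l.isEmpty && l.all (fun c => ('a' ≤ c && c ≤ 'z') || ('A' ≤ c && c ≤ 'Z'))

def del_space (str : String) : String :=
  let s := str.toList
  let lst := PySem.Chars.splitOn s [' ']
  let new_s := lst.foldl (fun new_s x =>
    let last := PySem.List.slice x (some (-1)) none   -- x[-1:]
    if pyBytesIsalpha last || PySem.Chars.strIsdigit last then
      new_s ++ x ++ [' ']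
    else
      new_s ++ x) []
  String.ofList new_s

-- ===== PORT B =====
-- _keeps(prev): prev is '' (modelled none) or one character; true iff an ASCII letter or digit
def bKeeps (prev : Option Char) : Bool :=
  match prev with
  | none => false
  | some c => ('a' ≤ c && c ≤ 'z') || ('A' ≤ c && c ≤ 'Z') || ('0' ≤ c && c ≤ '9')

def del_space_alt (str : String) : String :=
  let s := str.toList
  let st := s.foldl (fun (st : List Char × Option Char) c =>
    (if c ≠ ' ' then st.1 ++ [c]
     else if bKeeps st.2 then st.1 ++ [' ']
     else st.1,
     some c)) ([], none)
  String.ofList (if bKeeps st.2 then st.1 ++ [' '] else st.1)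

-- ===== PRECONDITION & SPEC =====
def Spec_del_space (str : String) (out : String) : Prop := out = del_space_alt str
instance (str : String) (out : String) : Decidable (Spec_del_space str out) := by unfold Spec_del_space; infer_instance

-- ===== CLAIM (what is proved, stated in full; the proofs are below) =====
def Claim_equal_del_space : Prop := ∀ (str : String), Dom_del_space str → Spec_del_space str (del_space str)

-- ===== LEMMAS AND PROOFS =====

-- A's split(' ') as direct structural recursion: cur is the reversed current token.
def splitA : List Char → List Char → List (List Char)
  | [], cur => [cur.reverse]
  | c :: rest, cur => if c = ' ' then cur.reverse :: splitA rest [] else splitA rest (c :: cur)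

-- B's emitted characters, recursively, given the previous character.
def emitB (cs : List Char) (prev : Option Char) : List Char :=
  match cs with
  | [] => if bKeeps prev then [' '] else []
  | c :: rest =>
      (if c ≠ ' ' then [c] else if bKeeps prev then [' '] else []) ++ emitB rest (some c)

-- last character of cs, defaulting to prev
def lastO (cs : List Char) (prev : Option Char) : Option Char :=
  match cs with
  | [] => prev
  | c :: rest => lastO rest (some c)

lemma go_eq : ∀ (fuel : Nat) (l cur : List Char) (acc : List (List Char)),
    l.length < fuel →
    PySem.Chars.splitOn.go [' '] fuel l cur acc = acc.reverse ++ splitA l cur := by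
  intro fuel
  induction fuel with
  | zero => intro l cur acc h; omega
  | succ n ih =>
    intro l cur acc h
    cases l with
    | nil =>
      simp [PySem.Chars.splitOn.go, splitA]
    | cons c rest =>
      rw [PySem.Chars.splitOn.go]
      by_cases hc : c = ' '
      · subst hc
        have hp : List.isPrefixOf [' '] (' ' :: rest) = true := by
          simp [List.isPrefixOf]
        simp only [hp, if_pos, List.length_cons, List.length_nil, List.drop_succ_cons,
          List.drop_zero]
        rw [ih rest [] (cur.reverse :: acc) (by simpa using Nat.lt_of_succ_lt_succ h)]
        simp [splitA]
      · have hp : List.isPrefixOf [' '] (c :: rest) = false := by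
          simp [List.isPrefixOf]
          intro h'; exact hc h'.symm
        simp only [hp, Bool.false_eq_true, if_neg, not_false_iff]
        rw [ih rest (c :: cur) acc (by simpa using Nat.lt_of_succ_lt_succ h)]
        simp [splitA, hc]

lemma splitOn_eq (cs : List Char) :
    PySem.Chars.splitOn cs [' '] = splitA cs [] := by
  unfold PySem.Chars.splitOn
  rw [go_eq (cs.length + 1) cs [] [] (by omega)]
  simp

-- the token-final test of A equals bKeeps of the token's last character
lemma cond_eq (tok : List Char) :
    (pyBytesIsalpha (PySem.List.slice tok (some (-1)) none) ||
     PySem.Chars.strIsdigit (PySem.List.slice tok (some (-1)) none)) = bKeeps tok.getLast? := by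
  induction tok using List.reverseRecOn with
  | nil => simp [PySem.List.slice, pyBytesIsalpha, PySem.Chars.strIsdigit, bKeeps]
  | append_singleton xs c _ =>
    have hs : PySem.List.slice (xs ++ [c]) (some (-1)) none = [c] := by
      rw [PySem.List.slice_from_neg_one]; simp
    rw [hs]
    simp only [List.getLast?_append, List.getLast?_singleton]
    simp [pyBytesIsalpha, PySem.Chars.strIsdigit, PySem.Chars.isdigit, bKeeps]

lemma bKeeps_congr (p q : Option Char) (h : bKeeps p = bKeeps q) (cs : List Char) :
    emitB cs p = emitB cs q := by
  cases cs <;> simp [emitB, h]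

-- A's fold over the tokens of splitA equals B's recursive emission
lemma fold_splitA (cs : List Char) : ∀ (cur : List Char) (acc : List Char),
    (splitA cs cur).foldl (fun new_s x =>
      if bKeeps x.getLast? then new_s ++ x ++ [' '] else new_s ++ x) acc
    = acc ++ cur.reverse ++ emitB cs cur.head? := by
  induction cs with
  | nil =>
    intro cur acc
    simp only [splitA, List.foldl_cons, List.foldl_nil, List.getLast?_reverse]
    cases h : bKeeps cur.head? <;> simp [emitB, h]
  | cons c rest ih =>
    intro cur acc
    by_cases hc : c = ' '
    · subst hc
      have hsp : splitA (' ' :: rest) cur = cur.reverse :: splitA rest [] := by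
        simp [splitA]
      rw [hsp, List.foldl_cons, ih [] _]
      rw [List.getLast?_reverse]
      have he : emitB rest (some ' ') = emitB rest (none : Option Char) := by
        apply bKeeps_congr; simp [bKeeps]
      cases h : bKeeps cur.head? <;>
        simp [emitB, h, he, List.append_assoc]
    · simp only [splitA, if_neg hc]
      rw [ih (c :: cur)]
      simp [emitB, hc, List.append_assoc]

-- B's foldl state characterised: buf part without the trailing-space step
def bodyB (cs : List Char) (prev : Option Char) : List Char :=
  match cs with
  | [] => []
  | c :: rest =>
      (if c ≠ ' ' then [c] else if bKeeps prev then [' '] else []) ++ bodyB rest (some c)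

lemma bfold (cs : List Char) : ∀ (buf : List Char) (prev : Option Char),
    cs.foldl (fun (st : List Char × Option Char) c =>
      (if c ≠ ' ' then st.1 ++ [c] else if bKeeps st.2 then st.1 ++ [' '] else st.1,
       some c)) (buf, prev)
    = (buf ++ bodyB cs prev, lastO cs prev) := by
  induction cs with
  | nil => intro buf prev; simp [bodyB, lastO]
  | cons c rest ih =>
    intro buf prev
    simp only [List.foldl_cons]
    rw [ih]
    by_cases hc : c = ' '
    · subst hc
      cases h : bKeeps prev <;> simp [bodyB, lastO, h]
    · simp [bodyB, lastO, hc]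

lemma emitB_eq_body (cs : List Char) : ∀ (prev : Option Char),
    emitB cs prev = bodyB cs prev ++ (if bKeeps (lastO cs prev) then [' '] else []) := by
  induction cs with
  | nil => intro prev; simp [emitB, bodyB, lastO]
  | cons c rest ih =>
    intro prev
    simp [emitB, bodyB, lastO, ih (some c), List.append_assoc]

lemma alt_eq_emit (str : String) :
    del_space_alt str = String.ofList (emitB str.toList none) := by
  unfold del_space_alt
  simp only [bfold]
  rw [emitB_eq_body]
  cases h : bKeeps (lastO str.toList none) <;> simp

-- ===== VERDICT (by name: the statement is the Claim_ definition above) =====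
theorem del_space_spec : Claim_equal_del_space := by
  intro str _
  unfold Spec_del_space
  unfold del_space
  have hf : (fun (new_s x : List Char) =>
      let last := PySem.List.slice x (some (-1)) none
      if pyBytesIsalpha last || PySem.Chars.strIsdigit last then
        new_s ++ x ++ [' ']
      else new_s ++ x)
      = (fun (new_s x : List Char) =>
          if bKeeps x.getLast? then new_s ++ x ++ [' '] else new_s ++ x) := by
    funext new_s x
    simp only []
    rw [cond_eq]
  simp only [hf]
  rw [splitOn_eq, fold_splitA, alt_eq_emit]
  simp
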